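-- pv_equiv track=rewrite | github.com/code-byter/sdc26_wireless_hacking | rf_hacking.py | encode_pt2262
-- ===== SOURCE A (Python) =====
-- def encode_pt2262(address, button, bits=24):
--     """
--     Encode a PT2262-style remote signal.
--
--     Args:
--         address: Device address/ID (20-bit)
--         button: Button code (4-bit)
--         bits: Total data bits (default 24)
--
--     Returns:
--         Raw bit pattern string for transmission
--     """
--     # Combine address and button into full code
--     code = ((address & 0xFFFFF) << 4) | (button & 0xF)
--
--     # Convert each bit to tri-state PWM encoding
--     # 1 = 1110 (long high, short low)
--     # 0 = 1000 (short high, long low)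
--     pattern = ""
--     for i in range(bits - 1, -1, -1):
--         bit = (code >> i) & 1
--         if bit:
--             pattern += "1110"
--         else:
--             pattern += "1000"
--
--     # Add stop bit (sync pulse)
--     pattern += "1"
--
--     return pattern
-- ===== SOURCE B (Python) =====
-- def encode_pt2262(address, button, bits=24):
--     # B: build the bit string once (mask + zero-padded binary format), then map each
--     # bit character to its PWM pattern through a translation table; simpler, no shift loop.
--     code = ((address & 0xFFFFF) << 4) | (button & 0xF)
--     if bits <= 0:
--         return "1"
--     m = code & ((1 << bits) - 1)
--     s = format(m, "0%db" % bits)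
--     return s.translate({49: "1110", 48: "1000"}) + "1"
-- ===== Notes on version B (the rewrite author's own statement) =====
-- stated objective: simpler
-- what changed: B masks the code to its low `bits` bits, formats it once as a zero-padded binary string, and translates each bit character to its PWM pattern through a lookup table, instead of A's per-index shift-and-test loop that accumulates the pattern string.
import Mathlib
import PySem

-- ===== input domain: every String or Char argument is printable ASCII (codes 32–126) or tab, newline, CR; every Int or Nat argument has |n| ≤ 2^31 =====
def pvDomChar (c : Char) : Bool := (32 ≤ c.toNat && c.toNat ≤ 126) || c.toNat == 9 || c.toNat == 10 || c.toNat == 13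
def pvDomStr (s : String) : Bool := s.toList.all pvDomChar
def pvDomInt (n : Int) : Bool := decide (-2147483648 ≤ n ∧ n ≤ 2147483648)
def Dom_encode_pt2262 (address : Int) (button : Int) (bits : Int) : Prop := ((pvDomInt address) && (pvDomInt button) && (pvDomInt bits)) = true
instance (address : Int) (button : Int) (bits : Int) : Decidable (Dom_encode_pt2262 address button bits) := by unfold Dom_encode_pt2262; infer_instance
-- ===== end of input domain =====

-- B builds the masked code's zero-padded binary string once and maps each bit character
-- through a PWM lookup table, instead of A's per-index shift-and-test loop (objective: simpler).

-- ===== PORT A =====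
def encode_pt2262 (address : Int) (button : Int) (bits : Int) : String :=
  let code : Int := PySem.Int.bor ((PySem.Int.band address 0xFFFFF) <<< 4) (PySem.Int.band button 0xF)
  -- range(bits-1, -1, -1): every element is ≥ 0, so `i.toNat` is exact for Python's `code >> i`
  let pattern : String :=
    (PySem.List.pyRange (bits - 1) (-1) (-1)).foldl
      (fun pat i =>
        if PySem.Int.band (code >>> i.toNat) 1 ≠ 0 then pat ++ "1110" else pat ++ "1000") ""
  pattern ++ "1"

-- ===== PORT B =====
-- `format(m, '0{k}b')` as a list of chars: zero-padded binary of width k; exact for 0 ≤ m < 2^k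
-- (the only way B calls it, since B masks m to the low `bits` bits first).
def pvPadBin : Nat → Nat → List Char
  | _, 0 => []
  | m, k+1 => pvPadBin (m / 2) k ++ [if m % 2 == 1 then '1' else '0']

def encode_pt2262_alt (address : Int) (button : Int) (bits : Int) : String :=
  let code : Int := PySem.Int.bor ((PySem.Int.band address 0xFFFFF) <<< 4) (PySem.Int.band button 0xF)
  if bits ≤ 0 then "1"
  else
    let m : Int := PySem.Int.band code ((1 <<< bits.toNat) - 1)
    let s : List Char := pvPadBin m.toNat bits.toNat
    -- s.translate({49: "1110", 48: "1000"}) + "1"  (s contains only '0'/'1')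
    String.ofList (s.flatMap (fun c => if c = '1' then "1110".toList else "1000".toList) ++ ['1'])

-- ===== PRECONDITION & SPEC =====
def Spec_encode_pt2262 (address : Int) (button : Int) (bits : Int) (out : String) : Prop := out = encode_pt2262_alt address button bits
instance (address : Int) (button : Int) (bits : Int) (out : String) : Decidable (Spec_encode_pt2262 address button bits out) := by unfold Spec_encode_pt2262; infer_instance

-- ===== CLAIM (what is proved, stated in full; the proofs are below) =====
def Claim_equal_encode_pt2262 : Prop := ∀ (address : Int) (button : Int) (bits : Int), Dom_encode_pt2262 address button bits → Spec_encode_pt2262 address button bits (encode_pt2262 address button bits)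

-- ===== LEMMAS AND PROOFS =====

-- pvPadBin only reads the low k bits of its first argument
lemma pvPadBin_mod (k : Nat) : ∀ n : Nat, pvPadBin (n % 2 ^ k) k = pvPadBin n k := by
  induction k with
  | zero => intro n; rfl
  | succ k ih =>
    intro n
    have h1 : n % 2 ^ (k + 1) / 2 = n / 2 % 2 ^ k := by
      rw [pow_succ, mul_comm, Nat.mod_mul_right_div_self]
    have h2 : n % 2 ^ (k + 1) % 2 = n % 2 :=
      Nat.mod_mod_of_dvd n (dvd_pow_self 2 (Nat.succ_ne_zero k))
    simp only [pvPadBin, h1, h2, ih]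

-- peel the most significant of the low k+1 bits off in front
lemma pvPadBin_succ_msb (k : Nat) : ∀ n : Nat,
    pvPadBin n (k + 1) = (if (n >>> k) % 2 == 1 then '1' else '0') :: pvPadBin n k := by
  induction k with
  | zero => intro n; simp [pvPadBin]
  | succ k ih =>
    intro n
    have hsh : (n / 2) >>> k = n >>> (k + 1) := by
      rw [Nat.add_comm k 1, Nat.shiftRight_add, Nat.shiftRight_one]
    calc pvPadBin n (k + 2)
        = pvPadBin (n / 2) (k + 1) ++ [if n % 2 == 1 then '1' else '0'] := rfl
      _ = ((if ((n / 2) >>> k) % 2 == 1 then '1' else '0') :: pvPadBin (n / 2) k)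
            ++ [if n % 2 == 1 then '1' else '0'] := by rw [ih]
      _ = (if ((n / 2) >>> k) % 2 == 1 then '1' else '0') ::
            (pvPadBin (n / 2) k ++ [if n % 2 == 1 then '1' else '0']) := rfl
      _ = (if (n >>> (k + 1)) % 2 == 1 then '1' else '0') :: pvPadBin n (k + 1) := by
            rw [hsh]; rfl

-- A's countdown fold over range(k-1, -1, -1) produces exactly B's translated bit string
lemma foldA_eq (n : Nat) (k : Nat) : ∀ acc : String,
    (PySem.List.pyRange ((k : Int) - 1) (-1) (-1)).foldl
      (fun pat i =>
        if PySem.Int.band (((n : Int)) >>> i.toNat) 1 ≠ 0 then pat ++ "1110" else pat ++ "1000") acc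
    = acc ++ String.ofList
        ((pvPadBin n k).flatMap (fun c => if c = '1' then "1110".toList else "1000".toList)) := by
  induction k with
  | zero =>
    intro acc
    rw [PySem.List.pyRange_neg_one_eq_nil (by omega)]
    simp [pvPadBin]
  | succ k ih =>
    intro acc
    have hcast : ((k + 1 : Nat) : Int) - 1 = (k : Int) := by push_cast; ring
    rw [hcast, PySem.List.pyRange_neg_one_cons (by omega), List.foldl_cons, ih]
    have hbit : PySem.Int.band (((n >>> k : Nat) : Int)) (1 : Int)
        = (((n >>> k) &&& 1 : Nat) : Int) := PySem.Int.band_natCast (n >>> k) 1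
    rw [Int.toNat_natCast, Int.shiftRight_natCast, hbit, pvPadBin_succ_msb]
    simp only [ne_eq, Int.natCast_eq_zero, Nat.and_one_is_mod]
    rcases Nat.mod_two_eq_zero_or_one (n >>> k) with h | h
    · simp [h, List.flatMap_cons, String.append_assoc]
      rw [show ("1000" : String) = String.ofList ['1', '0', '0', '0'] from rfl,
        ← String.ofList_append]
      rfl
    · simp [h, List.flatMap_cons, String.append_assoc]
      rw [show ("1110" : String) = String.ofList ['1', '1', '1', '0'] from rfl,
        ← String.ofList_append]
      rfl

theorem encode_pt2262_spec_aux (address button bits : Int) :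
    encode_pt2262 address button bits = encode_pt2262_alt address button bits := by
  unfold encode_pt2262 encode_pt2262_alt
  have h1 : 0 ≤ PySem.Int.band address 0xFFFFF := by
    rw [PySem.Int.band_comm]; exact PySem.Int.band_nonneg_of_nonneg_left _ (by norm_num)
  have h2 : 0 ≤ (PySem.Int.band address 0xFFFFF) <<< (4 : Int) := by
    rw [show (4 : Int) = ((4 : Nat) : Int) from rfl, Int.shiftLeft_natCast_right,
      Int.shiftLeft_eq]
    positivity
  have h3 : 0 ≤ PySem.Int.band button 0xF := by
    rw [PySem.Int.band_comm]; exact PySem.Int.band_nonneg_of_nonneg_left _ (by norm_num)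
  rw [PySem.Int.bor_of_nonneg h2 h3]
  set nn : Nat := ((PySem.Int.band address 0xFFFFF) <<< (4 : Int)).toNat |||
    (PySem.Int.band button 0xF).toNat with hnn
  by_cases hb : bits ≤ 0
  · simp only [if_pos hb]
    rw [PySem.List.pyRange_neg_one_eq_nil (by omega)]
    simp
  · simp only [if_neg hb]
    set k : Nat := bits.toNat with hk
    have hbk : bits - 1 = (k : Int) - 1 := by omega
    rw [hbk, foldA_eq nn k ""]
    have h2p : (1 : Nat) ≤ 2 ^ k := Nat.one_le_two_pow
    have hmask : (((1 <<< k : Nat) : Int)) - 1 = ((2 ^ k - 1 : Nat) : Int) := by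
      rw [Nat.one_shiftLeft]
      push_cast [h2p]
      ring
    have hband : PySem.Int.band ((nn : Nat) : Int) ((2 ^ k - 1 : Nat) : Int)
        = ((nn &&& (2 ^ k - 1) : Nat) : Int) := PySem.Int.band_natCast nn (2 ^ k - 1)
    rw [hmask, hband, Int.toNat_natCast, Nat.and_two_pow_sub_one_eq_mod, pvPadBin_mod]
    rw [String.empty_append, show ("1" : String) = String.ofList ['1'] from rfl,
      String.ofList_append]

-- ===== VERDICT (by name: the statement is the Claim_ definition above) =====
theorem encode_pt2262_spec : Claim_equal_encode_pt2262 := by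
  intro address button bits _
  exact encode_pt2262_spec_aux address button bits
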